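-- pv_equiv track=rewrite | github.com/HoonDragonite/ps | Programmers/level1/부족한 금액 계산하기.py | solution
-- ===== SOURCE A (Python) =====
-- def solution(price, money, count):
--     sum = 0
--     answer = 0
--
--     for i in range(count):
--         sum+=price*(i+1)
--     if sum > money:
--         answer = sum - money
--
--     return answer
-- ===== SOURCE B (Python) =====
-- def solution(price, money, count):
--     n = count if count > 0 else 0
--     total = price * (n * (n + 1) // 2)
--     return total - money if total > money else 0
-- ===== Notes on version B (the rewrite author's own statement) =====
-- stated objective: faster
-- what changed: Replaced the O(count) loop summing price*(i+1) with the arithmetic-series closed form price*(n*(n+1)//2) and a conditional expression.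
import Mathlib
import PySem

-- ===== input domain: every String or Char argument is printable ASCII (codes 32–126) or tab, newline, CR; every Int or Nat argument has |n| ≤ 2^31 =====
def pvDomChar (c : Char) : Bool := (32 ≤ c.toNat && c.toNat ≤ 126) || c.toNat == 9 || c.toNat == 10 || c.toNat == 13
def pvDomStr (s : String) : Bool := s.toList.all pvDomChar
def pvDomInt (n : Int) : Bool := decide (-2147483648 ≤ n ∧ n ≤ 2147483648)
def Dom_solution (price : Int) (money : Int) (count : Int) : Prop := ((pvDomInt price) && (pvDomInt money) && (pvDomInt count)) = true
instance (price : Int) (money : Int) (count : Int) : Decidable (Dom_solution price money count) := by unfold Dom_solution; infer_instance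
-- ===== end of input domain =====

-- B replaces A's O(count) summation loop with the O(1) arithmetic-series closed form (objective: faster).

-- ===== PORT A =====
def solution (price : Int) (money : Int) (count : Int) : Int :=
  let sum := (PySem.List.pyRange 0 count 1).foldl (fun s i => s + price * (i + 1)) 0
  let answer : Int := 0
  let answer := if sum > money then sum - money else answer
  answer

-- ===== PORT B =====
def solution_alt (price : Int) (money : Int) (count : Int) : Int :=
  let n := if count > 0 then count else 0
  let total := price * PySem.Int.floordiv (n * (n + 1)) 2
  if total > money then total - money else 0

-- ===== PRECONDITION & SPEC =====
def Spec_solution (price : Int) (money : Int) (count : Int) (out : Int) : Prop := out = solution_alt price money count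
instance (price : Int) (money : Int) (count : Int) (out : Int) : Decidable (Spec_solution price money count out) := by unfold Spec_solution; infer_instance

-- ===== CLAIM (what is proved, stated in full; the proofs are below) =====
def Claim_equal_solution : Prop := ∀ (price : Int) (money : Int) (count : Int), Dom_solution price money count → Spec_solution price money count (solution price money count)

-- ===== LEMMAS AND PROOFS =====

-- Loop invariant: twice the loop's running sum equals price * n * (n+1).
lemma pv_sum_closed (price : Int) (n : Nat) :
    ∀ acc : Int, 2 * ((PySem.List.pyRange 0 (n : Int) 1).foldl (fun s i => s + price * (i + 1)) acc)
      = 2 * acc + price * (n : Int) * ((n : Int) + 1) := by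
  induction n with
  | zero => intro acc; simp [PySem.List.pyRange_one_eq_nil]
  | succ m ih =>
    intro acc
    have h : PySem.List.pyRange 0 ((m : Int) + 1) 1
        = PySem.List.pyRange 0 (m : Int) 1 ++ [(m : Int)] :=
      PySem.List.pyRange_one_succ_right (by positivity)
    push_cast
    rw [h, List.foldl_append]
    simp only [List.foldl]
    linear_combination ih acc

-- Exact halving: n*(n+1) is even, so floordiv (n*(n+1)) 2 doubles back to n*(n+1).
lemma pv_fd_even (n : Int) (_hn : 0 ≤ n) :
    2 * PySem.Int.floordiv (n * (n + 1)) 2 = n * (n + 1) := by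
  rw [PySem.Int.floordiv_eq_ediv_of_pos (a := n * (n + 1)) (by omega)]
  have he : Even (n * (n + 1)) := Int.even_mul_succ_self n
  have h2 : n * (n + 1) % 2 = 0 := Int.even_iff.mp he
  omega

theorem solution_spec : Claim_equal_solution := by
  intro price money count _
  unfold Spec_solution solution solution_alt
  by_cases hc : count > 0
  · simp only [hc, if_pos]
    obtain ⟨n, hn⟩ : ∃ n : Nat, count = (n : Int) := ⟨count.toNat, by omega⟩
    subst hn
    have hsum := pv_sum_closed price n 0
    have hfd := pv_fd_even (n : Int) (by positivity)
    have h2 : 2 * ((PySem.List.pyRange 0 (n : Int) 1).foldl (fun s i => s + price * (i + 1)) 0)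
        = 2 * (price * PySem.Int.floordiv ((n : Int) * ((n : Int) + 1)) 2) := by
      linear_combination hsum - price * hfd
    have h3 : (PySem.List.pyRange 0 (n : Int) 1).foldl (fun s i => s + price * (i + 1)) 0
        = price * PySem.Int.floordiv ((n : Int) * ((n : Int) + 1)) 2 := by linarith
    rw [h3]
  · have hle : count ≤ 0 := by omega
    simp only [hc, if_false]
    rw [PySem.List.pyRange_one_eq_nil hle]
    simp [PySem.Int.floordiv]
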